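-- pv_equiv track=rewrite | github.com/Danura30082/INFO-Crypto | Even_Odd_Cesar.py | find_smallest_char
-- ===== SOURCE A (Python) =====
-- def find_smallest_char(message):
--     smallest_char_even, smallest_char_odd = ord(message[0]), ord(message[1])
--     for letter_index in range(len(message)):
--         if letter_index%2 == 0:
--             if ord(message[letter_index]) < smallest_char_even:
--                 smallest_char_even = ord(message[letter_index])
--         else:
--             if ord(message[letter_index]) < smallest_char_odd:
--                 smallest_char_odd = ord(message[letter_index])
--     return smallest_char_even, smallest_char_odd
-- ===== SOURCE B (Python) =====
-- def find_smallest_char(message):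
--     evens = message[::2]
--     odds = message[1::2]
--     return min(ord(c) for c in evens), min(ord(c) for c in odds)
-- ===== Notes on version B (the rewrite author's own statement) =====
-- stated objective: simpler
-- what changed: Replaced the single indexed loop with a per-index parity branch and two running minima by two parity slices (message[::2], message[1::2]) whose minima are taken with the builtin min, with no loop, index arithmetic or accumulator.
import Mathlib
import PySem

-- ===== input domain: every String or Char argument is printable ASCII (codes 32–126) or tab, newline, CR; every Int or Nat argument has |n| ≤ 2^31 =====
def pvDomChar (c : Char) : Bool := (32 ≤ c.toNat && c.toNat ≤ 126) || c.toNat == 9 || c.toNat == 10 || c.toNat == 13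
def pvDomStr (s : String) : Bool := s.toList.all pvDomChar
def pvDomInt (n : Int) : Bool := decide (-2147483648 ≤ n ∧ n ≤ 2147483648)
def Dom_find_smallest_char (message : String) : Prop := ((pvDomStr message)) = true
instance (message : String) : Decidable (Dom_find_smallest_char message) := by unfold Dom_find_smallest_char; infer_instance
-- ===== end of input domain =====

-- B replaces A's single indexed loop with a parity branch by two parity slices and the builtin min (simpler; no loop or accumulator).
-- ===== PORT A =====
-- loop body of A (state (smallest_char_even, smallest_char_odd), index i)
def pvStepA (cs : List Char) (st : Int × Int) (i : Int) : Int × Int :=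
  if PySem.Int.mod i 2 == 0 then
    if ((PySem.List.pyGetD cs i ' ').toNat : Int) < st.1 then (((PySem.List.pyGetD cs i ' ').toNat : Int), st.2) else st
  else
    if ((PySem.List.pyGetD cs i ' ').toNat : Int) < st.2 then (st.1, ((PySem.List.pyGetD cs i ' ').toNat : Int)) else st

def find_smallest_char (message : String) : Int × Int :=
  let cs := message.toList
  match cs with
  | c0 :: c1 :: _ =>   -- ord(message[0]), ord(message[1]); IndexError when len < 2 (excluded by Pre_)
    (PySem.List.pyRange 0 (cs.length : Int) 1).foldl (pvStepA cs) ((c0.toNat : Int), (c1.toNat : Int))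
  | _ => (0, 0)

-- ===== PORT B =====
-- B: evens = message[::2]; odds = message[1::2]; min(ord(c) for c in …) on each.
-- Python's min raises ValueError on an empty sequence (len < 2, excluded by Pre_); the port's getD 0 is unreachable there.
def find_smallest_char_alt (message : String) : Int × Int :=
  let cs := message.toList
  let evens := (PySem.List.slice? cs none none 2).getD []
  let odds := (PySem.List.slice? cs (some 1) none 2).getD []
  ((PySem.List.min? (evens.map (fun c => (c.toNat : Int))) id).getD 0,
   (PySem.List.min? (odds.map (fun c => (c.toNat : Int))) id).getD 0)

-- ===== PRECONDITION & SPEC =====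
-- Pre_ excludes strings of length < 2, on which A raises IndexError (message[1]) and B raises ValueError (min of an empty sequence).
def Pre_find_smallest_char (message : String) : Prop := 2 ≤ message.toList.length
instance (message : String) : Decidable (Pre_find_smallest_char message) := by unfold Pre_find_smallest_char; infer_instance
def pvWitness_find_smallest_char : String := "ab"

def Spec_find_smallest_char (message : String) (out : Int × Int) : Prop := out = find_smallest_char_alt message
instance (message : String) (out : Int × Int) : Decidable (Spec_find_smallest_char message out) := by unfold Spec_find_smallest_char; infer_instance

-- ===== CLAIM (what is proved, stated in full; the proofs are below) =====
def Claim_equal_find_smallest_char : Prop := ∀ (message : String), Dom_find_smallest_char message → Pre_find_smallest_char message → Spec_find_smallest_char message (find_smallest_char message)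

-- ===== LEMMAS AND PROOFS =====
-- characters at even / odd positions (proof-only helpers)
def pvEvens {α : Type} : List α → List α
  | [] => []
  | [a] => [a]
  | a :: _ :: l => a :: pvEvens l

def pvOdds {α : Type} : List α → List α
  | [] => []
  | [_] => []
  | _ :: b :: l => b :: pvOdds l

theorem pvEvens_cons {α : Type} (x : α) (t : List α) :
    pvEvens (x :: t) = x :: pvEvens t.tail := by
  cases t <;> rfl

theorem pvOdds_eq_pvEvens_tail {α : Type} (l : List α) :
    pvOdds l = pvEvens l.tail := by
  induction l using pvOdds.induct with
  | case1 => rfl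
  | case2 a => rfl
  | case3 a b l ih => rw [show pvOdds (a :: b :: l) = b :: pvOdds l from rfl, ih,
      List.tail_cons, pvEvens_cons]

theorem pvLoopA_eq_min (cs : List Char) :
    ∀ (l : List Char) (k : Nat) (e o : Int), cs.drop k = l → k % 2 = 0 →
    (PySem.List.pyRange (k : Int) (cs.length : Int) 1).foldl (pvStepA cs) (e, o) =
      ((pvEvens l).foldl (fun m c => min m (c.toNat : Int)) e,
       (pvOdds l).foldl (fun m c => min m (c.toNat : Int)) o) := by
  intro l
  induction l using pvEvens.induct with
  | case1 =>
    intro k e o hdrop _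
    have hle : cs.length ≤ k := by
      have := congrArg List.length hdrop; simp [List.length_drop] at this; omega
    rw [PySem.List.pyRange_one_eq_nil (by exact_mod_cast hle)]
    simp [pvEvens, pvOdds]
  | case2 a =>
    intro k e o hdrop hk
    have hlen : cs.length = k + 1 := by
      have := congrArg List.length hdrop; simp [List.length_drop] at this; omega
    have ha : PySem.List.pyGetD cs (k : Int) ' ' = a := by
      rw [PySem.List.pyGetD_natCast]
      have h0 : (cs.drop k)[0]? = some a := by rw [hdrop]; rfl
      rw [List.getElem?_drop] at h0
      simp [List.getD]
      rw [show cs[k]? = some a from by simpa using h0]; rfl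
    have hmod : PySem.Int.mod (k : Int) 2 = 0 := by
      rw [PySem.Int.mod_eq_emod_of_pos (by norm_num : (0:Int) < 2)]; omega
    rw [hlen, show ((k + 1 : Nat) : Int) = (k : Int) + 1 by push_cast; ring,
        PySem.List.pyRange_one_singleton]
    simp only [List.foldl_cons, List.foldl_nil, pvStepA, hmod, ha, pvEvens, pvOdds]
    norm_num
    split_ifs <;> simp <;> omega
  | case3 a b l ih =>
    intro k e o hdrop hk
    have hlen : cs.length = k + l.length + 2 := by
      have := congrArg List.length hdrop; simp [List.length_drop] at this; omega
    have ha : PySem.List.pyGetD cs (k : Int) ' ' = a := by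
      rw [PySem.List.pyGetD_natCast]
      have h0 : (cs.drop k)[0]? = some a := by rw [hdrop]; rfl
      rw [List.getElem?_drop] at h0
      simp [List.getD]
      rw [show cs[k]? = some a from by simpa using h0]; rfl
    have hb : PySem.List.pyGetD cs ((k : Int) + 1) ' ' = b := by
      rw [show ((k : Int) + 1) = ((k + 1 : Nat) : Int) by push_cast; ring,
          PySem.List.pyGetD_natCast]
      have h1 : (cs.drop k)[1]? = some b := by rw [hdrop]; rfl
      rw [List.getElem?_drop] at h1
      simp [List.getD]
      rw [show cs[k + 1]? = some b from by simpa using h1]; rfl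
    have hdrop2 : cs.drop (k + 2) = l := by
      have := congrArg (List.drop 2) hdrop
      rwa [List.drop_drop] at this
    have hmod : PySem.Int.mod (k : Int) 2 = 0 := by
      rw [PySem.Int.mod_eq_emod_of_pos (by norm_num : (0:Int) < 2)]; omega
    have hmod1 : PySem.Int.mod ((k : Int) + 1) 2 = 1 := by
      rw [PySem.Int.mod_eq_emod_of_pos (by norm_num : (0:Int) < 2)]; omega
    have hcons1 : PySem.List.pyRange (k : Int) (cs.length : Int) 1 =
        (k : Int) :: PySem.List.pyRange ((k : Int) + 1) (cs.length : Int) 1 :=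
      PySem.List.pyRange_one_cons (by exact_mod_cast (by omega : k < cs.length))
    have hcons2 : PySem.List.pyRange ((k : Int) + 1) (cs.length : Int) 1 =
        ((k : Int) + 1) :: PySem.List.pyRange ((k : Int) + 2) (cs.length : Int) 1 := by
      have := PySem.List.pyRange_one_cons
        (a := (k : Int) + 1) (b := (cs.length : Int))
        (by exact_mod_cast (by omega : (k : Int) + 1 < (cs.length : Int)))
      rw [this]; ring_nf
    rw [hcons1, hcons2]
    simp only [List.foldl_cons]
    have hstep1 : pvStepA cs (e, o) (k : Int) = (min e (a.toNat : Int), o) := by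
      simp only [pvStepA, hmod, ha]
      norm_num
      split_ifs <;> simp <;> omega
    have hstep2 : pvStepA cs (min e (a.toNat : Int), o) ((k : Int) + 1) =
        (min e (a.toNat : Int), min o (b.toNat : Int)) := by
      simp only [pvStepA, hmod1, hb]
      norm_num
      split_ifs <;> simp <;> omega
    rw [hstep1, hstep2,
        show ((k : Int) + 2) = ((k + 2 : Nat) : Int) by push_cast; ring,
        ih (k + 2) _ _ hdrop2 (by omega)]
    simp [pvEvens, pvOdds]

-- every-second-element extraction via an index range equals pvEvens
theorem pvFilterMap_range_eq_pvEvens {α : Type} (ys : List α) :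
    (List.range ((ys.length + 1) / 2)).filterMap (fun k => ys[2 * k]?) = pvEvens ys := by
  induction ys using pvEvens.induct with
  | case1 => simp [pvEvens]
  | case2 a => simp [pvEvens]
  | case3 a b l ih =>
    have hc : ((a :: b :: l).length + 1) / 2 = (l.length + 1) / 2 + 1 := by
      simp [List.length_cons]; omega
    rw [hc, List.range_succ_eq_map, List.filterMap_cons, List.filterMap_map]
    simp only [Function.comp]
    have : ∀ k : Nat, (a :: b :: l)[2 * (k + 1)]? = l[2 * k]? := by
      intro k
      rw [show 2 * (k + 1) = 2 * k + 1 + 1 by ring]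
      simp
    simp only [this]
    simp [ih, pvEvens]

-- B's two slices are exactly the parity sublists
theorem pvSlice2_eq (cs : List Char) (s : Nat) :
    PySem.List.slice? cs (some (s : Int)) none 2 = some (pvEvens (cs.drop s)) := by
  unfold PySem.List.slice? PySem.List.sliceIndices
  norm_num
  have hneg : ¬((s : Int) < 0) := by omega
  simp only [if_neg hneg]
  have hstart : min (s : Int) (cs.length : Int) = ((min s cs.length : Nat) : Int) := by
    push_cast; omega
  rw [hstart]
  by_cases h : min s cs.length < cs.length
  · rw [if_pos (by exact_mod_cast h)]
    have hs : min s cs.length = s := by omega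
    have hcount : (((cs.length : Int) - ((min s cs.length : Nat) : Int) + 2 - 1) / 2).toNat
        = ((cs.drop s).length + 1) / 2 := by
      rw [hs]; simp only [List.length_drop]; omega
    rw [hcount]
    conv_rhs => rw [← pvFilterMap_range_eq_pvEvens (cs.drop s)]
    apply List.filterMap_congr
    intro k _
    rw [hs]
    have ht : ((s : Int) + 2 * (k : Int)).toNat = s + 2 * k := by omega
    rw [ht, List.getElem?_drop]
  · rw [if_neg (by exact_mod_cast h)]
    have hdrop : cs.drop s = [] := List.drop_eq_nil_of_le (by omega)
    simp [hdrop, pvEvens]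

theorem pvSlice2_none_eq (cs : List Char) :
    PySem.List.slice? cs none none 2 = some (pvEvens cs) := by
  rw [show PySem.List.slice? cs none none 2 = PySem.List.slice? cs (some ((0 : Nat) : Int)) none 2 from by
    unfold PySem.List.slice? PySem.List.sliceIndices; norm_num]
  simpa using pvSlice2_eq cs 0

theorem find_smallest_char_spec : Claim_equal_find_smallest_char := by
  intro message _ hpre
  have hpre' : 2 ≤ message.toList.length := hpre
  obtain ⟨c0, c1, rest, h⟩ : ∃ c0 c1 rest, message.toList = c0 :: c1 :: rest := by
    match hm : message.toList with
    | [] => rw [hm] at hpre'; simp at hpre'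
    | [c] => rw [hm] at hpre'; simp at hpre'
    | c0 :: c1 :: rest => exact ⟨c0, c1, rest, rfl⟩
  unfold Spec_find_smallest_char find_smallest_char find_smallest_char_alt
  rw [h]
  simp only
  have hA := pvLoopA_eq_min (c0 :: c1 :: rest) (c0 :: c1 :: rest) 0
    (c0.toNat : Int) (c1.toNat : Int) rfl rfl
  norm_num at hA
  push_cast [List.length_cons]
  rw [hA]
  have hO := pvSlice2_eq (c0 :: c1 :: rest) 1
  norm_num at hO
  rw [pvSlice2_none_eq, hO]
  simp [pvEvens, pvOdds, pvOdds_eq_pvEvens_tail, pvEvens_cons, min_self]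
  constructor <;>
    (rw [show (id : Int → Int) = (fun y => y) from rfl, PySem.List.min?_id_cons];
     simp [List.foldl_map])
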